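-- pv_equiv track=rewrite | github.com/CodecoolBP20172/pbwp-2nd-tw-python-game-python-game-pair-13 | battleship_LB_CSD.py | list_of_position
-- ===== SOURCE A (Python) =====
-- def list_of_position(board):
--     # saves the position of the ships placed by the player
--     galley_pos = []
--     yacht_pos = []
--     pirate_ship_pos = []
--     longship_pos = []
--     armored_cruiser_pos = []
--     for i_x, x in enumerate(board):
--         for i_y, y in enumerate(x):
--             if "G" in y:
--                 galley_pos.append([i_x, i_y])
--             if "Y" in y:
--                 yacht_pos.append([i_x, i_y])
--             if "P" in y:
--                 pirate_ship_pos.append([i_x, i_y])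
--             if "L" in y:
--                 longship_pos.append([i_x, i_y])
--             if "A" in y:
--                 armored_cruiser_pos.append([i_x, i_y])
--     return galley_pos, yacht_pos, pirate_ship_pos, longship_pos, armored_cruiser_pos
-- ===== SOURCE B (Python) =====
-- def list_of_position(board):
--     # Five independent full scans, one comprehension per ship marker.
--     def positions(marker):
--         return [[i, j] for i, row in enumerate(board) for j, cell in enumerate(row) if marker in cell]
--     return positions("G"), positions("Y"), positions("P"), positions("L"), positions("A")
-- ===== Notes on version B (the rewrite author's own statement) =====
-- stated objective: idiomatic
-- what changed: Replaces A's single fused pass maintaining five accumulator lists with a positions(marker) comprehension run as five separate full scans of the board, one per marker.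
import Mathlib
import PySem

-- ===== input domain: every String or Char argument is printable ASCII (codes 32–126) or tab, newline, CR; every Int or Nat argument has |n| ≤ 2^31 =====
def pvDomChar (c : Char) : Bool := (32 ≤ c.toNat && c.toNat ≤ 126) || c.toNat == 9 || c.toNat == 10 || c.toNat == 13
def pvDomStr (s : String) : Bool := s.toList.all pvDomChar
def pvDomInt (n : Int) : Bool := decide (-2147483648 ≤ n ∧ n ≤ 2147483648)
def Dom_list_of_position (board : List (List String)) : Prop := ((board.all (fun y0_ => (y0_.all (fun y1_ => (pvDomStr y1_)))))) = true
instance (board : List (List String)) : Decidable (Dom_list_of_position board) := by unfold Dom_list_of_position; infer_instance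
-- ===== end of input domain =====

-- B replaces A's single fused pass (five accumulators) with one comprehension per marker,
-- five separate full scans of the board (idiomatic; return value identical).


-- ===== PORT A =====
-- one fused pass: five accumulator lists, appended to cell by cell
def list_of_position (board : List (List String)) : List (List Int) × List (List Int) × List (List Int) × List (List Int) × List (List Int) :=
  (PySem.List.enumerate board).foldl
    (fun st ix =>
      (PySem.List.enumerate ix.2).foldl
        (fun st2 jy =>
          let g := if PySem.Str.isIn "G" jy.2 then st2.1 ++ [[ix.1, jy.1]] else st2.1
          let y := if PySem.Str.isIn "Y" jy.2 then st2.2.1 ++ [[ix.1, jy.1]] else st2.2.1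
          let p := if PySem.Str.isIn "P" jy.2 then st2.2.2.1 ++ [[ix.1, jy.1]] else st2.2.2.1
          let l := if PySem.Str.isIn "L" jy.2 then st2.2.2.2.1 ++ [[ix.1, jy.1]] else st2.2.2.2.1
          let a := if PySem.Str.isIn "A" jy.2 then st2.2.2.2.2 ++ [[ix.1, jy.1]] else st2.2.2.2.2
          (g, y, p, l, a))
        st)
    ([], [], [], [], [])

-- ===== PORT B =====
-- positions(marker): comprehension = flatMap over rows, flatMap over cells
def pvPositions (board : List (List String)) (marker : String) : List (List Int) :=
  (PySem.List.enumerate board).flatMap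
    (fun ix => (PySem.List.enumerate ix.2).flatMap
      (fun jy => if PySem.Str.isIn marker jy.2 then [[ix.1, jy.1]] else []))

def list_of_position_alt (board : List (List String)) : List (List Int) × List (List Int) × List (List Int) × List (List Int) × List (List Int) :=
  (pvPositions board "G", pvPositions board "Y", pvPositions board "P", pvPositions board "L", pvPositions board "A")

-- ===== PRECONDITION & SPEC =====
def Spec_list_of_position (board : List (List String)) (out : List (List Int) × List (List Int) × List (List Int) × List (List Int) × List (List Int)) : Prop := out = list_of_position_alt board
instance (board : List (List String)) (out : List (List Int) × List (List Int) × List (List Int) × List (List Int) × List (List Int)) : Decidable (Spec_list_of_position board out) := by unfold Spec_list_of_position; infer_instance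

-- ===== CLAIM (what is proved, stated in full; the proofs are below) =====
def Claim_equal_list_of_position : Prop := ∀ (board : List (List String)), Dom_list_of_position board → Spec_list_of_position board (list_of_position board)

-- ===== LEMMAS AND PROOFS =====

-- one row's contribution for marker m, enumerated from j
def pvRowPos (i : Int) (row : List String) (j : Int) (m : String) : List (List Int) :=
  (PySem.List.enumerate row j).flatMap
    (fun jy => if PySem.Str.isIn m jy.2 then [[i, jy.1]] else [])

lemma inner_fold (i : Int) (row : List String) :
    ∀ (j : Int) (g y p l a : List (List Int)),
    (PySem.List.enumerate row j).foldl
      (fun st2 jy =>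
        let g := if PySem.Str.isIn "G" jy.2 then st2.1 ++ [[i, jy.1]] else st2.1
        let y := if PySem.Str.isIn "Y" jy.2 then st2.2.1 ++ [[i, jy.1]] else st2.2.1
        let p := if PySem.Str.isIn "P" jy.2 then st2.2.2.1 ++ [[i, jy.1]] else st2.2.2.1
        let l := if PySem.Str.isIn "L" jy.2 then st2.2.2.2.1 ++ [[i, jy.1]] else st2.2.2.2.1
        let a := if PySem.Str.isIn "A" jy.2 then st2.2.2.2.2 ++ [[i, jy.1]] else st2.2.2.2.2
        (g, y, p, l, a))
      (g, y, p, l, a)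
    = (g ++ pvRowPos i row j "G", y ++ pvRowPos i row j "Y", p ++ pvRowPos i row j "P",
       l ++ pvRowPos i row j "L", a ++ pvRowPos i row j "A") := by
  induction row with
  | nil => intro j g y p l a; simp [pvRowPos, PySem.List.enumerate_nil]
  | cons c rest ih =>
    intro j g y p l a
    simp only [PySem.List.enumerate_cons, List.foldl_cons, List.flatMap_cons, pvRowPos]
    rw [ih]
    simp [pvRowPos]
    split_ifs <;> simp

lemma outer_fold (board : List (List String)) :
    ∀ (s : Int) (g y p l a : List (List Int)),
    (PySem.List.enumerate board s).foldl
      (fun st ix =>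
        (PySem.List.enumerate ix.2).foldl
          (fun st2 jy =>
            let g := if PySem.Str.isIn "G" jy.2 then st2.1 ++ [[ix.1, jy.1]] else st2.1
            let y := if PySem.Str.isIn "Y" jy.2 then st2.2.1 ++ [[ix.1, jy.1]] else st2.2.1
            let p := if PySem.Str.isIn "P" jy.2 then st2.2.2.1 ++ [[ix.1, jy.1]] else st2.2.2.1
            let l := if PySem.Str.isIn "L" jy.2 then st2.2.2.2.1 ++ [[ix.1, jy.1]] else st2.2.2.2.1
            let a := if PySem.Str.isIn "A" jy.2 then st2.2.2.2.2 ++ [[ix.1, jy.1]] else st2.2.2.2.2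
            (g, y, p, l, a))
          st)
      (g, y, p, l, a)
    = (g ++ (PySem.List.enumerate board s).flatMap (fun ix => pvRowPos ix.1 ix.2 0 "G"),
       y ++ (PySem.List.enumerate board s).flatMap (fun ix => pvRowPos ix.1 ix.2 0 "Y"),
       p ++ (PySem.List.enumerate board s).flatMap (fun ix => pvRowPos ix.1 ix.2 0 "P"),
       l ++ (PySem.List.enumerate board s).flatMap (fun ix => pvRowPos ix.1 ix.2 0 "L"),
       a ++ (PySem.List.enumerate board s).flatMap (fun ix => pvRowPos ix.1 ix.2 0 "A")) := by
  induction board with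
  | nil => intro s g y p l a; simp [PySem.List.enumerate_nil]
  | cons r rest ih =>
    intro s g y p l a
    simp only [PySem.List.enumerate_cons, List.foldl_cons, List.flatMap_cons]
    rw [inner_fold, ih]
    simp

-- ===== VERDICT (by name: the statement is the Claim_ definition above) =====
theorem list_of_position_spec : Claim_equal_list_of_position := by
  intro board _
  unfold Spec_list_of_position list_of_position list_of_position_alt pvPositions
  rw [outer_fold]
  simp [pvRowPos]
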